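-- pv_equiv track=rewrite | github.com/DianaWijaya/data-structures-and-algorithms | projects/boyer-moore-for-binary/boyer_moore_binary.py | matched_prefix_array
-- ===== SOURCE A (Python) =====
-- def calculate_z_value(s):
--     """
--     Computes the Z-array for a given string.
--
--     The Z-array for a string s is an array where z[i] represents the length of the longest substring
--     starting from s[i] that matches the prefix of s.
--
--     Parameters:
--         s (str): The input string.
--
--     Returns:
--         List[int]: A list of integers representing the Z-values for each position in s.
--
--     Time Complexity:
--         O(n), where n is the length of the string.
--     """
--     n = len(s)
--     z = [0] * n
--     l, r = 0, 0
--
--     # Loop through the string to calculate the Z values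
--     for k in range(1, n):
--
--         # Case 1: If k is outside the current Z-box, compute z[k] using naive algorithm by explicit comparison
--         if k > r:
--             z_value = 0
--             while k + z_value < n and s[z_value] == s[k + z_value]:
--                 z_value += 1
--             z[k] = z_value
--             if z_value > 0:
--                 l, r = k, k + z_value - 1
--
--         # Case 2: If k is inside the current Z-box, use the Z-box values to compute z[k] more efficiently
--         else:
--             p = k - l # Corresponding index in the Z-box
--             remaining_zbox_len = r - k + 1 # Remaining length of the Z-box
--
--             # Case 2a (<): Copy z[k] = z[p] without checking since the match stays entirely inside the Z-box
--             if z[p] < remaining_zbox_len: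
--                 z[k] = z[p]
--
--             # Case 2b (=): Extend the Z-box by explicit comparison, since the match may continue beyond r
--             elif z[p] == remaining_zbox_len:
--                 z_value = remaining_zbox_len
--                 while r + 1 < n and s[r + 1] == s[z_value]:
--                     r += 1
--                     z_value += 1
--                 z[k] = r - k + 1
--                 l, r = k, r
--
--             # Case 2c (>): Set z[k] = right_part_length to avoid checking beyond the verified Z-box
--             else:
--                 z[k] = remaining_zbox_len
--
--     return z
--
-- def matched_prefix_array(pattern):
--     """
--     Constructs the matched prefix table for the Boyer-Moore string matching algorithm.
--
--     Parameters:
--         pattern (str): The pattern string for which the matched prefix table is built.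
--
--     Returns:
--         List[int]: Matched prefix table for the pattern string.
--
--     Time Complexity:
--         O(m), where m is the length of the pattern.
--     """
--     m = len(pattern)
--
--     # Calculate the Z-values for the pattern
--     z_array = calculate_z_value(pattern)
--     matched_prefix = [0] * (m + 1)
--
--     # Loop through in reverse to calculate matched prefix values
--     for j in range(m - 1, -1, -1):
--
--         if j + z_array[j] == m:
--             matched_prefix[j] = z_array[j]
--         else:
--             matched_prefix[j] = matched_prefix[j + 1]
--
--     matched_prefix[0] = m
--
--     return matched_prefix
-- ===== SOURCE B (Python) =====
-- def matched_prefix_array(pattern):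
--     m = len(pattern)
--     matched_prefix = [0] * (m + 1)
--     longest = 0
--     for j in range(m - 1, -1, -1):
--         if pattern[:m - j] == pattern[j:]:
--             longest = m - j
--         matched_prefix[j] = longest
--     matched_prefix[0] = m
--     return matched_prefix
-- ===== Notes on version B (the rewrite author's own statement) =====
-- stated objective: simpler
-- what changed: Dropped the Z-array helper entirely: B fills the table in one reverse pass, testing directly whether each suffix is a prefix via slice equality and carrying the most recent match length.
import Mathlib
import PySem

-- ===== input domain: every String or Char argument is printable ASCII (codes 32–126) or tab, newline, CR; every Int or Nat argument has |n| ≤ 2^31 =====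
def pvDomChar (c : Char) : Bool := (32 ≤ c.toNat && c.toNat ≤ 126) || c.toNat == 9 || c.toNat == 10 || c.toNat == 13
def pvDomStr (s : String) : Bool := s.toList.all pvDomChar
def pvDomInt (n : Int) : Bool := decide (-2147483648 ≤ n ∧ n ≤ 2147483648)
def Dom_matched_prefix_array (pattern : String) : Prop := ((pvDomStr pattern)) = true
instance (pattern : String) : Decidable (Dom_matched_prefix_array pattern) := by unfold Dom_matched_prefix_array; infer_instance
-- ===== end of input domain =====

-- B drops A's Z-array helper: one reverse pass testing suffix-is-prefix by slice
-- equality with a running match length (simpler, not faster). Return values proved equal.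

-- ===== PORT A =====
-- All integer quantities in A (indices, z-values, l, r) are provably nonnegative
-- throughout, so they are carried as Nat; the mutable arrays are carried as the
-- obvious functional state (z as an update function, mp built back-to-front).

-- `while k + z_value < n and s[z_value] == s[k + z_value]: z_value += 1`  (case 1)
def zNaive (s : List Char) (k z : Nat) : Nat :=
  if h : k + z < s.length ∧ s[z]? = s[(k+z)]? then zNaive s k (z+1) else z
termination_by s.length - (k + z)
decreasing_by omega

-- `while r + 1 < n and s[r + 1] == s[z_value]: r += 1; z_value += 1`  (case 2b)
def zExtend (s : List Char) (r zv : Nat) : Nat × Nat :=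
  if h : r + 1 < s.length ∧ s[(r+1)]? = s[zv]? then zExtend s (r+1) (zv+1) else (r, zv)
termination_by s.length - r
decreasing_by omega

-- `for k in range(1, n): ...` carrying the z array (as a function) and the Z-box (l, r)
def zLoop (s : List Char) (z : Nat → Nat) (l r k : Nat) : Nat → Nat :=
  if h : k < s.length then
    if r < k then
      let zv := zNaive s k 0
      let z' := fun i => if i = k then zv else z i
      if 0 < zv then zLoop s z' k (k + zv - 1) (k+1)
      else zLoop s z' l r (k+1)
    else
      let p := k - l
      let rem := r - k + 1
      if z p < rem then zLoop s (fun i => if i = k then z p else z i) l r (k+1)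
      else if z p = rem then
        let er := zExtend s r rem
        zLoop s (fun i => if i = k then er.1 - k + 1 else z i) k er.1 (k+1)
      else zLoop s (fun i => if i = k then rem else z i) l r (k+1)
  else z
termination_by s.length - k
decreasing_by all_goals omega

def calculate_z_value (s : List Char) : Nat → Nat :=
  zLoop s (fun _ => 0) 0 0 1

-- `for j in range(m-1, -1, -1)`: mpLoopA c produces the entries for indices (m-c)..m;
-- matched_prefix[j] reads z[j] and the entry just written at j+1 (the head).
def mpLoopA (z : Nat → Nat) (m : Nat) : Nat → List Int
  | 0 => [(0 : Int)]
  | c+1 =>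
    let j := m - (c+1)
    let rest := mpLoopA z m c
    (if j + z j = m then ((z j : Int)) else rest.headI) :: rest

def matched_prefix_array (pattern : String) : List Int :=
  let s := pattern.toList
  let m := s.length
  let zf := calculate_z_value s
  match mpLoopA zf m m with           -- `matched_prefix[0] = m`
  | [] => []
  | _ :: rest => (m : Int) :: rest

-- ===== PORT B =====
-- `for j in range(m-1, -1, -1)`: k entries remain (indices 0..k-1); acc holds the
-- entries already written (indices k..m); `longest` is the running value.
def altLoop (s : List Char) (m : Nat) : Nat → Nat → List Int → List Int
  | 0, _, acc => acc
  | k+1, longest, acc =>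
    let longest' := if s.take (m - k) = s.drop k then m - k else longest
    altLoop s m k longest' (((longest' : Int)) :: acc)

def matched_prefix_array_alt (pattern : String) : List Int :=
  let s := pattern.toList
  let m := s.length
  match altLoop s m m 0 [(0 : Int)] with   -- `matched_prefix[0] = m`
  | [] => []
  | _ :: rest => (m : Int) :: rest

-- ===== PRECONDITION & SPEC =====
def Spec_matched_prefix_array (pattern : String) (out : List Int) : Prop := out = matched_prefix_array_alt pattern
instance (pattern : String) (out : List Int) : Decidable (Spec_matched_prefix_array pattern out) := by unfold Spec_matched_prefix_array; infer_instance

-- ===== CLAIM (what is proved, stated in full; the proofs are below) =====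
def Claim_equal_matched_prefix_array : Prop := ∀ (pattern : String), Dom_matched_prefix_array pattern → Spec_matched_prefix_array pattern (matched_prefix_array pattern)

-- ===== LEMMAS AND PROOFS =====

-- length of the longest common prefix of two lists
def lcp : List Char → List Char → Nat
  | a::as, b::bs => if a = b then lcp as bs + 1 else 0
  | _, _ => 0

theorem lcp_le_left : ∀ (s t : List Char), lcp s t ≤ s.length := by
  intro s; induction s with
  | nil => intro t; cases t <;> simp [lcp]
  | cons a as ih => intro t; cases t with
    | nil => simp [lcp]
    | cons b bs => simp only [lcp]; split_ifs <;> simp [ih bs]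

theorem lcp_le_right : ∀ (s t : List Char), lcp s t ≤ t.length := by
  intro s; induction s with
  | nil => intro t; cases t <;> simp [lcp]
  | cons a as ih => intro t; cases t with
    | nil => simp [lcp]
    | cons b bs => simp only [lcp]; split_ifs <;> simp [ih bs]

theorem lcp_nil_right (s : List Char) : lcp s [] = 0 := by cases s <;> rfl

theorem lcp_take : ∀ (s t : List Char), s.take (lcp s t) = t.take (lcp s t) := by
  intro s; induction s with
  | nil => intro t; cases t <;> simp [lcp]
  | cons a as ih => intro t; cases t with
    | nil => simp [lcp]
    | cons b bs =>
      simp only [lcp]; split_ifs with hab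
    
      · subst hab; simp [List.take_succ_cons, ih bs]
      · simp
    

theorem lcp_stop : ∀ (s t : List Char),
    lcp s t = s.length ∨ lcp s t = t.length ∨ s[lcp s t]? ≠ t[lcp s t]? := by
  intro s; induction s with
  | nil => intro t; cases t <;> simp [lcp]
  | cons a as ih => intro t; cases t with
    | nil => simp [lcp]
    | cons b bs =>
      simp only [lcp]; split_ifs with hab
    
      · subst hab
        rcases ih bs with h | h | h
        · left; simp [h]
        · right; left; simp [h]
        · right; right; simpa using h
      · right; right; simpa using hab
    

theorem lcp_eq_of : ∀ (a : Nat) (s t : List Char), a ≤ s.length → a ≤ t.length →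
    s.take a = t.take a → (a = s.length ∨ a = t.length ∨ s[a]? ≠ t[a]?) → lcp s t = a := by
  intro a; induction a with
  | zero =>
    intro s t _ _ _ hstop
    rcases hstop with h | h | h
    · have : s = [] := List.length_eq_zero_iff.mp h.symm
      subst this; cases t <;> simp [lcp]
    · have : t = [] := List.length_eq_zero_iff.mp h.symm
      subst this; exact lcp_nil_right s
    · cases s with
      | nil => cases t <;> simp [lcp]
      | cons x xs => cases t with
        | nil => simp [lcp]
        | cons y ys =>
          simp only [List.getElem?_cons_zero] at h
          simp only [lcp]
          rw [if_neg]; intro hxy; exact h (by rw [hxy])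
  | succ a ih =>
    intro s t hs ht hpre hstop
    cases s with
    | nil => simp at hs
    | cons x xs => cases t with
      | nil => simp at ht
      | cons y ys =>
        simp only [List.take_succ_cons, List.cons.injEq] at hpre
        simp only [lcp, hpre.1, if_pos]
        have := ih xs ys (by simpa using hs) (by simpa using ht) hpre.2 (by
          rcases hstop with h | h | h
          · left; simpa using h
          · right; left; simpa using h
          · right; right; simpa using h)
        omega

theorem lcp_split : ∀ (a : Nat) (s t : List Char), a ≤ s.length → a ≤ t.length →
    s.take a = t.take a → lcp s t = a + lcp (s.drop a) (t.drop a) := by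
  intro a; induction a with
  | zero => intro s t _ _ _; simp
  | succ a ih =>
    intro s t hs ht hpre
    cases s with
    | nil => simp at hs
    | cons x xs => cases t with
      | nil => simp at ht
      | cons y ys =>
        simp only [List.take_succ_cons, List.cons.injEq] at hpre
        simp only [lcp, hpre.1, if_pos, List.drop_succ_cons]
        have := ih xs ys (by simpa using hs) (by simpa using ht) hpre.2
        omega

theorem lcp_drop_cons (s : List Char) (i j : Nat) (hij : i ≤ j) (hj : j < s.length) :
    lcp (s.drop i) (s.drop j) =
      if s[i]? = s[j]? then lcp (s.drop (i+1)) (s.drop (j+1)) + 1 else 0 := by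
  have hi : i < s.length := lt_of_le_of_lt hij hj
  rw [List.drop_eq_getElem_cons hi, List.drop_eq_getElem_cons hj]
  simp only [lcp, List.getElem?_eq_getElem hi, List.getElem?_eq_getElem hj,
    Option.some.injEq]

theorem lcp_drop_nil (s : List Char) (i j : Nat) (hj : s.length ≤ j) :
    lcp (s.drop i) (s.drop j) = 0 := by
  rw [List.drop_eq_nil_of_le hj, lcp_nil_right]

theorem zNaive_eq (s : List Char) (k z : Nat) :
    zNaive s k z = z + lcp (s.drop z) (s.drop (k+z)) := by
  rw [zNaive]
  by_cases hc : k + z < s.length ∧ s[z]? = s[(k+z)]?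
  · rw [dif_pos hc]
    rw [zNaive_eq s k (z+1)]
    rw [lcp_drop_cons s z (k+z) (by omega) hc.1, if_pos hc.2]
    have : k + z + 1 = k + (z + 1) := by omega
    rw [this]; omega
  · rw [dif_neg hc]
    by_cases hlen : k + z < s.length
    · have hne : s[z]? ≠ s[(k+z)]? := fun he => hc ⟨hlen, he⟩
      rw [lcp_drop_cons s z (k+z) (by omega) hlen, if_neg hne]; omega
    · rw [lcp_drop_nil s z (k+z) (by omega)]; omega
termination_by s.length - (k + z)
decreasing_by omega

theorem zExtend_eq (s : List Char) (k r zv : Nat) (hk : 1 ≤ k) (h : k + zv = r + 1) :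
    (zExtend s r zv).2 = zv + lcp (s.drop zv) (s.drop (k+zv)) ∧
      (zExtend s r zv).1 + 1 = k + (zExtend s r zv).2 := by
  rw [zExtend]
  by_cases hc : r + 1 < s.length ∧ s[(r+1)]? = s[zv]?
  · rw [dif_pos hc]
    have hrec := zExtend_eq s k (r+1) (zv+1) hk (by omega)
    have hkz : k + zv = r + 1 := h
    rw [lcp_drop_cons s zv (k+zv) (by omega) (by omega), if_pos (by rw [hkz]; exact hc.2.symm)]
    have : k + (zv + 1) = k + zv + 1 := by omega
    constructor
    · rw [hrec.1, this]; omega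
    · exact hrec.2
  · rw [dif_neg hc]
    by_cases hlen : r + 1 < s.length
    · have hne : s[(r+1)]? ≠ s[zv]? := fun he => hc ⟨hlen, he⟩
      rw [lcp_drop_cons s zv (k+zv) (by omega) (by omega),
        if_neg (by rw [h]; exact fun he => hne he.symm)]
      omega
    · rw [lcp_drop_nil s zv (k+zv) (by omega)]; omega
termination_by s.length - r
decreasing_by omega

theorem take_eq_get (s t : List Char) (n i : Nat) (h : s.take n = t.take n) (hi : i < n) :
    s[i]? = t[i]? := by
  have := congrArg (fun l => l[i]?) h
  simpa [List.getElem?_take, hi] using this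

-- positions inside the Z-box copy the prefix: chars of s at l+i and i agree for i < r-l+1
theorem box_get (s : List Char) (l r : Nat) (hbox : lcp s (s.drop l) = r - l + 1)
    (i : Nat) (hi : i < r - l + 1) : s[i]? = s[l + i]? := by
  have h1 : s.take (r - l + 1) = (s.drop l).take (r - l + 1) := by
    have := lcp_take s (s.drop l); rwa [hbox] at this
  have := take_eq_get s (s.drop l) (r - l + 1) i h1 hi
  rwa [List.getElem?_drop] at this

-- matching transfer: the first a ≤ min (z p) (r-k+1) chars at k coincide with the prefix
theorem box_transfer (s : List Char) (l r k zp : Nat)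
    (_hl1 : 1 ≤ l) (hlk : l < k) (hkr : k ≤ r) (_hrn : r < s.length)
    (hbox : lcp s (s.drop l) = r - l + 1)
    (hzp : lcp s (s.drop (k - l)) = zp)
    (a : Nat) (hazp : a ≤ zp) (harem : a ≤ r - k + 1) :
    s.take a = (s.drop k).take a := by
  have h1 : s.take (r - l + 1) = (s.drop l).take (r - l + 1) := by
    have := lcp_take s (s.drop l); rwa [hbox] at this
  have h2 : s.take zp = (s.drop (k - l)).take zp := by
    have := lcp_take s (s.drop (k - l)); rwa [hzp] at this
  have e1 : (s.drop k).take a = (s.drop (k - l)).take a := by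
    have hk_eq : s.drop k = (s.drop l).drop (k - l) := by
      rw [List.drop_drop]; congr 1; omega
    have estep : (((s.drop l).take (r - l + 1)).drop (k - l)).take a
        = ((s.drop l).drop (k - l)).take a := by
      rw [List.drop_take, List.take_take]; congr 1; omega
    have estep2 : ((s.take (r - l + 1)).drop (k - l)).take a
        = (s.drop (k - l)).take a := by
      rw [List.drop_take, List.take_take]; congr 1; omega
    rw [hk_eq, ← estep, ← h1, estep2]
  have e2 : (s.drop (k - l)).take a = s.take a := by
    have := congrArg (List.take a) h2
    rw [List.take_take, List.take_take, min_eq_left hazp] at this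
    exact this.symm
  rw [e1, e2]

-- the z-loop invariant
def ZInv (s : List Char) (z : Nat → Nat) (l r k : Nat) : Prop :=
  (∀ i, 1 ≤ i → i < k → z i = lcp s (s.drop i)) ∧
  (∀ i, i = 0 ∨ k ≤ i → z i = 0) ∧
  ((l = 0 ∧ r = 0) ∨
    (1 ≤ l ∧ l ≤ r ∧ l < k ∧ r < s.length ∧ lcp s (s.drop l) = r - l + 1))

theorem zLoop_spec (s : List Char) (k : Nat) (z : Nat → Nat) (l r : Nat)
    (hk : 1 ≤ k) (hinv : ZInv s z l r k) :
    (∀ i, 1 ≤ i → i < s.length → zLoop s z l r k i = lcp s (s.drop i)) ∧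
      zLoop s z l r k 0 = 0 := by
  rw [zLoop]
  by_cases hkn : k < s.length
  case neg =>
    rw [dif_neg hkn]
    exact ⟨fun i h1 h2 => hinv.1 i h1 (by omega), hinv.2.1 0 (Or.inl rfl)⟩
  case pos =>
  rw [dif_pos hkn]
  by_cases hrk : r < k
  case pos =>
    rw [if_pos hrk]
    have hzv : zNaive s k 0 = lcp s (s.drop k) := by rw [zNaive_eq]; simp
    have hz1 : ∀ i, 1 ≤ i → i < k + 1 →
        (if i = k then zNaive s k 0 else z i) = lcp s (s.drop i) := by
      intro i h1 h2
      by_cases hik : i = k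
      · rw [if_pos hik, hik, hzv]
      · rw [if_neg hik]; exact hinv.1 i h1 (by omega)
    have hz0 : ∀ i, i = 0 ∨ k + 1 ≤ i →
        (if i = k then zNaive s k 0 else z i) = 0 := by
      intro i hi
      rw [if_neg (by omega)]; exact hinv.2.1 i (by omega)
    have hle : zNaive s k 0 ≤ s.length - k := by
      rw [hzv]
      have := lcp_le_right s (s.drop k)
      simpa using this
    by_cases hpos : 0 < zNaive s k 0
    case pos =>
      rw [if_pos hpos]
      exact zLoop_spec s (k+1) _ k (k + zNaive s k 0 - 1) (by omega)
        ⟨hz1, hz0, Or.inr ⟨by omega, by omega, by omega, by omega, by rw [hzv.symm]; omega⟩⟩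
    case neg =>
      rw [if_neg hpos]
      refine zLoop_spec s (k+1) _ l r (by omega) ⟨hz1, hz0, ?_⟩
      rcases hinv.2.2 with h | h
      · exact Or.inl h
      · exact Or.inr ⟨h.1, h.2.1, by omega, h.2.2.2⟩
  case neg =>
    rw [if_neg hrk]
    have hbox : 1 ≤ l ∧ l ≤ r ∧ l < k ∧ r < s.length ∧ lcp s (s.drop l) = r - l + 1 := by
      rcases hinv.2.2 with ⟨h0, h0'⟩ | hb
      · exfalso; omega
      · exact hb
    have hp1 : 1 ≤ k - l := by omega
    have hpk : k - l < k := by omega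
    have hzp : z (k - l) = lcp s (s.drop (k - l)) := hinv.1 (k - l) hp1 hpk
    have hzple : z (k - l) ≤ s.length - (k - l) := by
      rw [hzp]
      have := lcp_le_right s (s.drop (k - l))
      simpa using this
    have F : ∀ a, a ≤ z (k - l) → a ≤ r - k + 1 → s.take a = (s.drop k).take a :=
      fun a h1 h2 =>
        box_transfer s l r k (z (k - l)) hbox.1 hbox.2.2.1 (by omega) hbox.2.2.2.1
          hbox.2.2.2.2 hzp.symm a h1 h2
    have hupd : ∀ v, v = lcp s (s.drop k) →
        (∀ i, 1 ≤ i → i < k + 1 → (if i = k then v else z i) = lcp s (s.drop i)) ∧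
        (∀ i, i = 0 ∨ k + 1 ≤ i → (if i = k then v else z i) = 0) := by
      intro v hv
      constructor
      · intro i h1 h2
        by_cases hik : i = k
        · rw [if_pos hik, hik, hv]
        · rw [if_neg hik]; exact hinv.1 i h1 (by omega)
      · intro i hi
        rw [if_neg (by omega)]; exact hinv.2.1 i (by omega)
    by_cases h2a : z (k - l) < r - k + 1
    case pos =>
      rw [if_pos h2a]
      -- case 2a: the match stays strictly inside the Z-box, z[k] = z[p]
      have hlcpk : lcp s (s.drop k) = z (k - l) := by
        apply lcp_eq_of
        · rw [hzp]; exact lcp_le_left s _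
        · simp only [List.length_drop]; omega
        · exact F (z (k - l)) le_rfl (by omega)
        · by_cases hkzp : k + z (k - l) < s.length
          · right; right
            have hst := lcp_stop s (s.drop (k - l))
            rw [← hzp] at hst
            simp only [List.length_drop] at hst
            rcases hst with h | h | h
            · exfalso; omega
            · exfalso; omega
            · have heq : s[k + z (k - l)]? = s[(k - l) + z (k - l)]? := by
                have hb := box_get s l r hbox.2.2.2.2 ((k - l) + z (k - l)) (by omega)
                rw [hb]; congr 1; omega
              rw [List.getElem?_drop]
              rw [List.getElem?_drop] at h
              rw [heq]; exact fun he => h he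
          · right; left
            simp only [List.length_drop]; omega
      exact zLoop_spec s (k+1) _ l r (by omega)
        ⟨(hupd _ hlcpk.symm).1, (hupd _ hlcpk.symm).2,
          Or.inr ⟨hbox.1, hbox.2.1, by omega, hbox.2.2.2.1, hbox.2.2.2.2⟩⟩
    case neg =>
    rw [if_neg h2a]
    by_cases h2b : z (k - l) = r - k + 1
    case pos =>
      rw [if_pos h2b]
      -- case 2b: extend the match beyond the Z-box by explicit comparison
      have hext := zExtend_eq s k r (r - k + 1) hk (by omega)
      have hsplit : lcp s (s.drop k) = (r - k + 1) + lcp (s.drop (r - k + 1)) (s.drop (k + (r - k + 1))) := by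
        have hdd : (s.drop k).drop (r - k + 1) = s.drop (k + (r - k + 1)) := by
          rw [List.drop_drop]
        have := lcp_split (r - k + 1) s (s.drop k) (by omega)
          (by simp only [List.length_drop]; omega) (F (r - k + 1) (by omega) le_rfl)
        rw [this, hdd]
      have her2 : (zExtend s r (r - k + 1)).2 = lcp s (s.drop k) := by
        rw [hext.1, hsplit]
      have her1 : (zExtend s r (r - k + 1)).1 + 1 = k + (zExtend s r (r - k + 1)).2 := hext.2
      have herge : r - k + 1 ≤ (zExtend s r (r - k + 1)).2 := by
        rw [hext.1]; omega
      have herlen : (zExtend s r (r - k + 1)).2 ≤ s.length - k := by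
        rw [her2]
        have := lcp_le_right s (s.drop k)
        simpa using this
      have hval : (zExtend s r (r - k + 1)).1 - k + 1 = lcp s (s.drop k) := by
        rw [← her2]; omega
      exact zLoop_spec s (k+1) _ k (zExtend s r (r - k + 1)).1 (by omega)
        ⟨(hupd _ hval).1, (hupd _ hval).2,
          Or.inr ⟨by omega, by omega, by omega, by omega, by rw [← her2]; omega⟩⟩
    case neg =>
      rw [if_neg h2b]
      -- case 2c: z[p] overshoots the Z-box, z[k] = remaining length exactly
      have hlcpk : lcp s (s.drop k) = r - k + 1 := by
        apply lcp_eq_of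
        · omega
        · simp only [List.length_drop]; omega
        · exact F (r - k + 1) (by omega) le_rfl
        · by_cases hrn1 : r + 1 = s.length
          · right; left
            simp only [List.length_drop]; omega
          · right; right
            have e_rem_box : s[r - k + 1]? = s[r - l + 1]? := by
              have h2 : s.take (z (k - l)) = (s.drop (k - l)).take (z (k - l)) := by
                have := lcp_take s (s.drop (k - l)); rwa [← hzp] at this
              have := take_eq_get s (s.drop (k - l)) (z (k - l)) (r - k + 1) h2 (by omega)
              rw [List.getElem?_drop] at this
              rw [this]; congr 1; omega
            have hst := lcp_stop s (s.drop l)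
            rw [hbox.2.2.2.2] at hst
            simp only [List.length_drop] at hst
            rcases hst with h | h | h
            · exfalso; omega
            · exfalso; omega
            · rw [List.getElem?_drop] at h
              have hlb : l + (r - l + 1) = r + 1 := by omega
              rw [hlb] at h
              rw [List.getElem?_drop, e_rem_box]
              have hkr1 : k + (r - k + 1) = r + 1 := by omega
              rw [hkr1]; exact h
      exact zLoop_spec s (k+1) _ l r (by omega)
        ⟨(hupd _ hlcpk.symm).1, (hupd _ hlcpk.symm).2,
          Or.inr ⟨hbox.1, hbox.2.1, by omega, hbox.2.2.2.1, hbox.2.2.2.2⟩⟩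
termination_by s.length - k
decreasing_by all_goals omega

theorem calc_z_spec (s : List Char) :
    (∀ i, 1 ≤ i → i < s.length → calculate_z_value s i = lcp s (s.drop i)) ∧
      calculate_z_value s 0 = 0 := by
  exact zLoop_spec s 1 (fun _ => 0) 0 0 le_rfl
    ⟨fun i h1 h2 => by omega, fun i _ => rfl, Or.inl ⟨rfl, rfl⟩⟩

-- the suffix-is-prefix condition, A-form vs B-form
theorem cond_iff (s : List Char) (j : Nat) (h1 : 1 ≤ j) (h2 : j < s.length) :
    (j + lcp s (s.drop j) = s.length) ↔ (s.take (s.length - j) = s.drop j) := by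
  have hdl : (s.drop j).length = s.length - j := by simp
  have hfull : (s.drop j).take (s.length - j) = s.drop j := by
    rw [← hdl]; exact List.take_length ..
  constructor
  · intro h
    have hval : lcp s (s.drop j) = s.length - j := by
      have := lcp_le_right s (s.drop j); omega
    have := lcp_take s (s.drop j)
    rw [hval, hfull] at this
    exact this
  · intro h
    have hval : lcp s (s.drop j) = s.length - j := by
      apply lcp_eq_of
      · omega
      · omega
      · rw [hfull]; exact h
      · right; left; omega
    omega

theorem assemble (s : List Char) (z : Nat → Nat)
    (hz : ∀ i, 1 ≤ i → i < s.length → z i = lcp s (s.drop i)) :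
    ∀ k, 1 ≤ k → k ≤ s.length → ∀ longest : Nat,
      (longest : Int) = (mpLoopA z s.length (s.length - k)).headI →
      altLoop s s.length k longest (mpLoopA z s.length (s.length - k)) =
        (s.length : Int) :: mpLoopA z s.length (s.length - 1) := by
  intro k
  induction k with
  | zero => omega
  | succ k ih =>
    intro _ hkm longest hhead
    by_cases hk0 : k = 0
    · subst hk0
      rw [altLoop]
      have hcond : s.take (s.length - 0) = s.drop 0 := by
        simp [List.take_length]
      rw [if_pos hcond, altLoop]
      simp
    · -- step: 1 ≤ k < s.length
      have hk1 : 1 ≤ k := by omega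
      have hkm' : k < s.length := by omega
      have hzk : z k = lcp s (s.drop k) := hz k hk1 hkm'
      have hcond : (s.take (s.length - k) = s.drop k) ↔ (k + z k = s.length) := by
        rw [hzk]; exact (cond_iff s k hk1 hkm').symm
      have hmk : s.length - k = (s.length - (k+1)) + 1 := by omega
      have hstep : mpLoopA z s.length (s.length - k) =
          (if k + z k = s.length then ((z k : Int)) else (mpLoopA z s.length (s.length - (k+1))).headI)
            :: mpLoopA z s.length (s.length - (k+1)) := by
        rw [hmk, mpLoopA]
        have : s.length - ((s.length - (k+1)) + 1) = k := by omega
        rw [this]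
      rw [altLoop]
      have hlong : ((if s.take (s.length - k) = s.drop k then s.length - k else longest : Nat) : Int)
          = (if k + z k = s.length then ((z k : Int)) else (mpLoopA z s.length (s.length - (k+1))).headI) := by
        by_cases hc : s.take (s.length - k) = s.drop k
        · rw [if_pos hc, if_pos (hcond.mp hc)]
          have : z k = s.length - k := by
            have := hcond.mp hc; omega
          rw [this]
        · rw [if_neg hc, if_neg (fun h => hc (hcond.mpr h))]
          rw [hhead]
      have hacc : ((if s.take (s.length - k) = s.drop k then s.length - k else longest : Nat) : Int)
            :: mpLoopA z s.length (s.length - (k+1)) = mpLoopA z s.length (s.length - k) := by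
        rw [hstep, hlong]
      rw [hacc]
      exact ih hk1 (by omega) _ (by rw [hstep, List.headI_cons]; exact hlong)

-- ===== VERDICT (by name: the statement is the Claim_ definition above) =====
theorem matched_prefix_array_spec : Claim_equal_matched_prefix_array := by
  intro pattern _
  unfold Spec_matched_prefix_array matched_prefix_array matched_prefix_array_alt
  simp only []
  by_cases hm : pattern.toList.length = 0
  · rw [hm]; rfl
  · have hm1 : 1 ≤ pattern.toList.length := by omega
    have hz := (calc_z_spec pattern.toList).1
    have hasm := assemble pattern.toList (calculate_z_value pattern.toList) hz
      pattern.toList.length hm1 le_rfl 0 (by rw [Nat.sub_self]; rfl)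
    rw [Nat.sub_self] at hasm
    rw [show ([(0:Int)] : List Int)
        = mpLoopA (calculate_z_value pattern.toList) pattern.toList.length 0 from rfl, hasm]
    have e : mpLoopA (calculate_z_value pattern.toList) pattern.toList.length pattern.toList.length
        = mpLoopA (calculate_z_value pattern.toList) pattern.toList.length
            ((pattern.toList.length - 1) + 1) := by
      congr 1; omega
    rw [e, mpLoopA]
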